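-- pv_equiv track=rewrite | github.com/MichalKal99/BrainEmbeddings | preprocessing/audio_utils.py | find_class_regions
-- ===== SOURCE A (Python) =====
-- def find_class_regions(arr):
--     class_regions = []
--     start_index = 0
--     current_class = arr[0]
--
--     for i in range(1, len(arr)):
--         if arr[i] != current_class:
--             class_regions.append(([start_index, i - 1], "skyblue" if current_class==1 else "lightcoral"))
--             start_index = i
--             current_class = arr[i]
--
--     # Add the last region
--     class_regions.append(([start_index, len(arr) - 1], "skyblue" if current_class==1 else "lightcoral"))
--
--     return class_regions
-- ===== SOURCE B (Python) =====
-- def find_class_regions(arr):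
--     n = len(arr)
--     boundaries = [0] + [i for i in range(1, n) if arr[i] != arr[i - 1]] + [n]
--     return [([s, e - 1], "skyblue" if arr[s] == 1 else "lightcoral")
--             for s, e in zip(boundaries, boundaries[1:])]
-- ===== Notes on version B (the rewrite author's own statement) =====
-- stated objective: alternative
-- what changed: Replaces A's single-pass running accumulator (start index + current class carried through the loop) by a two-phase structure: first build the explicit list of run-boundary indices, then map over consecutive boundary pairs to emit each region with its color.
import Mathlib
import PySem

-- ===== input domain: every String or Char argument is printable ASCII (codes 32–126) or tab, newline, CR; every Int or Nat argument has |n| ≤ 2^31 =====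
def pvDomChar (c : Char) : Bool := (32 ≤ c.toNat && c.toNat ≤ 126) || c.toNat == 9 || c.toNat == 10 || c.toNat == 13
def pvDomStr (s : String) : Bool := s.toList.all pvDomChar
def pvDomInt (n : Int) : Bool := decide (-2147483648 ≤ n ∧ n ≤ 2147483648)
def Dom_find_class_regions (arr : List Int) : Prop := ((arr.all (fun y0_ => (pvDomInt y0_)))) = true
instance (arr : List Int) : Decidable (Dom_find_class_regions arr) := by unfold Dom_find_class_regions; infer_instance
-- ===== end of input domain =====

-- B replaces A's single-pass running accumulator by a two-phase scheme: build the
-- boundary-index list first, then map over consecutive boundary pairs (alternative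
-- decomposition, same cost). Pre_ excludes the empty list, on which both Pythons raise.


-- ===== PORT A =====
-- literal port of A: one fold over range(1, len(arr)) carrying (regions, start_index, current_class)
def find_class_regions (arr : List Int) : List (List Int × String) :=
  let n : Int := arr.length
  let st := (PySem.List.pyRange 1 n 1).foldl
    (fun (st : List (List Int × String) × Int × Int) i =>
      if PySem.List.pyGetD arr i 0 ≠ st.2.2 then
        (st.1 ++ [([st.2.1, i - 1], if st.2.2 = 1 then "skyblue" else "lightcoral")],
         i, PySem.List.pyGetD arr i 0)
      else st)
    ([], 0, PySem.List.pyGetD arr 0 0)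
  st.1 ++ [([st.2.1, n - 1], if st.2.2 = 1 then "skyblue" else "lightcoral")]

-- ===== PORT B =====
-- literal port of B: boundary list first, then a map over consecutive boundary pairs
def find_class_regions_alt (arr : List Int) : List (List Int × String) :=
  let n : Int := arr.length
  let boundaries : List Int :=
    0 :: (PySem.List.pyRange 1 n 1).filter
          (fun i => PySem.List.pyGetD arr i 0 ≠ PySem.List.pyGetD arr (i - 1) 0) ++ [n]
  (boundaries.zip boundaries.tail).map
    (fun se => ([se.1, se.2 - 1],
                if PySem.List.pyGetD arr se.1 0 = 1 then "skyblue" else "lightcoral"))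

-- ===== PRECONDITION & SPEC =====
-- Pre_ excludes exactly the empty list: there Python A raises IndexError reading the first element (B raises too).
def Pre_find_class_regions (arr : List Int) : Prop := arr ≠ []
instance (arr : List Int) : Decidable (Pre_find_class_regions arr) := by unfold Pre_find_class_regions; infer_instance
def pvWitness_find_class_regions : List Int := ([1, 1, 0, 1])

def Spec_find_class_regions (arr : List Int) (out : List (List Int × String)) : Prop := out = find_class_regions_alt arr
instance (arr : List Int) (out : List (List Int × String)) : Decidable (Spec_find_class_regions arr out) := by unfold Spec_find_class_regions; infer_instance

-- ===== CLAIM (what is proved, stated in full; the proofs are below) =====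
def Claim_equal_find_class_regions : Prop := ∀ (arr : List Int), Dom_find_class_regions arr → Pre_find_class_regions arr → Spec_find_class_regions arr (find_class_regions arr)

-- ===== LEMMAS AND PROOFS =====

-- color of the region starting at index s
def pvColor (arr : List Int) (s : Int) : String :=
  if PySem.List.pyGetD arr s 0 = 1 then "skyblue" else "lightcoral"

-- regions generated by a list of boundary positions (consecutive pairs)
def pvMk (arr : List Int) : List Int → List (List Int × String)
  | s :: e :: rest => ([s, e - 1], pvColor arr s) :: pvMk arr (e :: rest)
  | _ => []

-- boundary list of the first m positions (0 plus every change point below m)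
def pvBnds (arr : List Int) (m : Int) : List Int :=
  0 :: (PySem.List.pyRange 1 m 1).filter
        (fun i => PySem.List.pyGetD arr i 0 ≠ PySem.List.pyGetD arr (i - 1) 0)

-- A's loop body, named for the proofs (definitionally the lambda in port A)
def pvStep (arr : List Int) (st : List (List Int × String) × Int × Int) (i : Int) :
    List (List Int × String) × Int × Int :=
  if PySem.List.pyGetD arr i 0 ≠ st.2.2 then
    (st.1 ++ [([st.2.1, i - 1], if st.2.2 = 1 then "skyblue" else "lightcoral")],
     i, PySem.List.pyGetD arr i 0)
  else st

theorem pvBnds_ne_nil (arr : List Int) (m : Int) : pvBnds arr m ≠ [] := by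
  simp [pvBnds]

-- B's zip-map over a boundary list equals pvMk
theorem pvZip_eq_mk (arr : List Int) (bs : List Int) :
    (bs.zip bs.tail).map
      (fun se => ([se.1, se.2 - 1],
                  if PySem.List.pyGetD arr se.1 0 = 1 then "skyblue" else "lightcoral"))
      = pvMk arr bs := by
  match bs with
  | [] => rfl
  | [s] => rfl
  | s :: e :: rest =>
    simp only [List.tail_cons, List.zip_cons_cons, List.map_cons, pvMk, pvColor]
    exact congrArg (List.cons _) (pvZip_eq_mk arr (e :: rest))

-- appending a final boundary appends the final region
theorem pvMk_append_last (arr : List Int) (xs : List Int) (h : xs ≠ []) (e : Int) :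
    pvMk arr (xs ++ [e])
      = pvMk arr xs ++ [([xs.getLast h, e - 1], pvColor arr (xs.getLast h))] := by
  match xs with
  | [s] => rfl
  | s :: t :: rest =>
    have := pvMk_append_last arr (t :: rest) (by simp) e
    simp only [List.cons_append, pvMk] at this ⊢
    simp [this, List.getLast]

-- loop invariant: after processing range(1, m), the accumulated regions are pvMk of the
-- boundaries found so far, start_index is the last boundary, current_class is the element
-- there, and moreover arr[m-1] still belongs to that last region.
theorem pvLoop_inv (arr : List Int) (m : Nat) (hm : 1 ≤ m) :
    (PySem.List.pyRange 1 (m : Int) 1).foldl (pvStep arr)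
        ([], 0, PySem.List.pyGetD arr 0 0)
      = (pvMk arr (pvBnds arr m),
         (pvBnds arr m).getLast (pvBnds_ne_nil arr m),
         PySem.List.pyGetD arr ((pvBnds arr m).getLast (pvBnds_ne_nil arr m)) 0)
    ∧ PySem.List.pyGetD arr ((m : Int) - 1) 0
        = PySem.List.pyGetD arr ((pvBnds arr m).getLast (pvBnds_ne_nil arr m)) 0 := by
  induction m with
  | zero => omega
  | succ k ih =>
    by_cases hk : 1 ≤ k
    · obtain ⟨ih1, ih2⟩ := ih hk
      have hr : PySem.List.pyRange 1 ((k : Int) + 1) 1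
          = PySem.List.pyRange 1 (k : Int) 1 ++ [(k : Int)] :=
        PySem.List.pyRange_one_succ_right (by exact_mod_cast hk)
      have hcast : ((k + 1 : Nat) : Int) = (k : Int) + 1 := by push_cast; ring
      rw [hcast, hr, List.foldl_append, ih1]
      simp only [List.foldl_cons, List.foldl_nil]
      have hbnds : pvBnds arr ((k : Nat) + 1)
          = pvBnds arr (k : Nat)
            ++ (if PySem.List.pyGetD arr (k : Int) 0
                    ≠ PySem.List.pyGetD arr ((k : Int) - 1) 0
                then [(k : Int)] else []) := by
        simp only [pvBnds, hr, List.filter_append, List.cons_append]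
        congr 1
        rcases eq_or_ne (PySem.List.pyGetD arr (k : Int) 0)
            (PySem.List.pyGetD arr ((k : Int) - 1) 0) with h | h
        · rw [if_neg (by simp [h])]
          simp_all [List.filter]
        · rw [if_pos h]
          simp_all [List.filter]
      by_cases hneq :
          PySem.List.pyGetD arr (k : Int) 0
            ≠ PySem.List.pyGetD arr ((pvBnds arr (k : Nat)).getLast (pvBnds_ne_nil arr k)) 0
      · -- change point at k: a region is emitted, start and class move to k
        have hb2 : pvBnds arr ((k : Nat) + 1) = pvBnds arr (k : Nat) ++ [(k : Int)] := by
          rw [hbnds, if_pos (by rw [ih2]; exact hneq)]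
        rw [pvStep, if_pos hneq]
        constructor
        · simp only [hb2]
          rw [pvMk_append_last arr _ (pvBnds_ne_nil arr k) (k : Int)]
          simp [pvColor]
        · simp only [hb2, List.getLast_append_singleton]
          have he : (k : Int) + 1 - 1 = (k : Int) := by ring
          rw [he]
      · -- no change: state and boundary list unchanged
        push Not at hneq
        have hb2 : pvBnds arr ((k : Nat) + 1) = pvBnds arr (k : Nat) := by
          rw [hbnds, if_neg (by push Not; rw [ih2]; exact hneq)]; simp
        rw [pvStep, if_neg (by push Not; exact hneq)]
        refine ⟨by simp [hb2], ?_⟩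
        have he : (k : Int) + 1 - 1 = (k : Int) := by ring
        rw [he]
        simp only [hb2]
        exact hneq
    · -- first iteration bound: the range is empty and the boundary list is the singleton zero
      have hk0 : k = 0 := by omega
      subst hk0
      have e1 : (((0 : Nat) + 1 : Nat) : Int) = 1 := by norm_num
      have h1 : pvBnds arr 1 = [0] := by
        unfold pvBnds
        rw [PySem.List.pyRange_one_eq_nil le_rfl]
        simp
      simp only [e1, h1, PySem.List.pyRange_one_eq_nil le_rfl]
      refine ⟨?_, ?_⟩ <;> simp [pvMk]

-- ===== VERDICT (by name: the statement is the Claim_ definition above) =====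
theorem find_class_regions_spec : Claim_equal_find_class_regions := by
  intro arr _ hpre
  unfold Spec_find_class_regions find_class_regions find_class_regions_alt
  have hlen : 1 ≤ arr.length := List.length_pos_of_ne_nil hpre
  have hstep : (fun (st : List (List Int × String) × Int × Int) i =>
      if PySem.List.pyGetD arr i 0 ≠ st.2.2 then
        (st.1 ++ [([st.2.1, i - 1], if st.2.2 = 1 then "skyblue" else "lightcoral")],
         i, PySem.List.pyGetD arr i 0)
      else st) = pvStep arr := rfl
  obtain ⟨h1, _⟩ := pvLoop_inv arr arr.length hlen
  simp only [hstep, h1]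
  rw [show (0 : Int) :: (PySem.List.pyRange 1 (arr.length : Int) 1).filter
        (fun i => PySem.List.pyGetD arr i 0 ≠ PySem.List.pyGetD arr (i - 1) 0) ++ [(arr.length : Int)]
      = pvBnds arr arr.length ++ [(arr.length : Int)] from by simp [pvBnds],
    pvZip_eq_mk, pvMk_append_last arr _ (pvBnds_ne_nil arr arr.length)]
  simp [pvColor]
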